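-- pv_equiv track=rewrite | github.com/Lucertae/documents_translator | app/core/glm_ocr.py | _might_contain_table
-- ===== SOURCE A (Python) =====
-- def _might_contain_table(text: str) -> bool:
--     """
--     Heuristic to detect if text might contain tables.
--
--     Looks for patterns like:
--     - Pipe characters (markdown tables)
--     - Tab-separated values
--     - Aligned columns (multiple consecutive spaces)
--     - Numeric patterns in columns
--     """
--     # Check for pipe characters (markdown tables)
--     if '|' in text and text.count('|') > 4:
--         return True
--
--     # Check for tab-separated values
--     if '\t' in text:
--         return True
--
--     # Check for aligned columns (multiple spaces between words)
--     lines = text.split('\n')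
--     aligned_lines = sum(1 for line in lines if '   ' in line.strip())
--     if aligned_lines > 3:
--         return True
--
--     return False
-- ===== SOURCE B (Python) =====
-- def _might_contain_table(text: str) -> bool:
--     """Single character-level state machine over the raw text: no split(),
--     strip() or substring search.  Counts pipes, flags tabs, and detects a
--     run of >=3 spaces that has a non-whitespace character both before and
--     after it on the same line (exactly what "'   ' in line.strip()" means,
--     since strip only removes whitespace at the line's ends)."""
--     pipes = 0
--     has_tab = False
--     aligned = 0
--     seen = False      # a non-whitespace char has occurred on this line
--     run = 0           # length of the current run of ' ' characters
--     good = False      # a run >=3 after some non-ws char, no non-ws char since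
--     line_ok = False   # this line's stripped form contains three spaces
--     for ch in text:
--         if ch == '\n':
--             if line_ok:
--                 aligned += 1
--             seen = False
--             run = 0
--             good = False
--             line_ok = False
--         else:
--             if ch == '|':
--                 pipes += 1
--             if ch == '\t':
--                 has_tab = True
--             if ch == ' ':
--                 run += 1
--                 if seen and run >= 3:
--                     good = True
--             elif ch.isspace():
--                 run = 0
--             else:
--                 if good:
--                     line_ok = True
--                 seen = True
--                 run = 0
--                 good = False
--     if line_ok:
--         aligned += 1
--     return pipes > 4 or has_tab or aligned > 3
-- ===== Notes on version B (the rewrite author's own statement) =====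
-- stated objective: alternative
-- what changed: Replaces A's staged library scans (a full-text pipe count, a tab membership test, then a line split with per-line strip and substring search) by a single character-level state machine over the raw text that counts pipes, flags tabs and counts lines holding a run of three-plus spaces with non-whitespace on both sides.
import Mathlib
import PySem

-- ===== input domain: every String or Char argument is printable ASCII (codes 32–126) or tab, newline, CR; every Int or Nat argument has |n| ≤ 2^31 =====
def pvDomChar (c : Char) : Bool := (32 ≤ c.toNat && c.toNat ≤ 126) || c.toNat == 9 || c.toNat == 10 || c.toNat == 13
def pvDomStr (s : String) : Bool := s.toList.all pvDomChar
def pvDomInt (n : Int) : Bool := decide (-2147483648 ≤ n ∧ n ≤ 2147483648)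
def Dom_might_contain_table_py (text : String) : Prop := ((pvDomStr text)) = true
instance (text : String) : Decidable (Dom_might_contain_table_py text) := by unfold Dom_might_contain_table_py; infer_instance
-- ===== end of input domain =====

-- B replaces A's staged library scans (count, membership, split+strip+substring search)
-- by a single character-level state machine over the raw text; same value everywhere (objective: alternative).

-- ===== PORT A =====
def might_contain_table_py (text : String) : Bool :=
  if PySem.Str.isIn "|" text && decide (4 < PySem.Str.count text "|") then true
  else if PySem.Str.isIn "\t" text then true
  else
    let lines := PySem.Chars.splitOn text.toList ['\n']
    let aligned_lines : Int :=
      ((lines.filter (fun line => PySem.Chars.isIn [' ', ' ', ' '] (PySem.Chars.strip line))).map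
        (fun _ => (1 : Int))).sum
    if 3 < aligned_lines then true else false

-- ===== PORT B =====
-- one step of Source B's character state machine; state = (pipes, has_tab, aligned, seen, run, good, line_ok)
def bstep : (Int × Bool × Int × Bool × Int × Bool × Bool) → Char → (Int × Bool × Int × Bool × Int × Bool × Bool)
  | (pipes, tab, aligned, seen, run, good, ok), ch =>
    if ch = '\n' then
      (pipes, tab, if ok then aligned + 1 else aligned, false, 0, false, false)
    else
      let pipes := if ch = '|' then pipes + 1 else pipes
      let tab := if ch = '\t' then true else tab
      if ch = ' ' then
        let run := run + 1
        let good := if seen && decide (3 ≤ run) then true else good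
        (pipes, tab, aligned, seen, run, good, ok)
      else if PySem.Chars.isspace ch then
        (pipes, tab, aligned, seen, 0, good, ok)
      else
        (pipes, tab, aligned, true, 0, false, if good then true else ok)

def might_contain_table_py_alt (text : String) : Bool :=
  match text.toList.foldl bstep (0, false, 0, false, 0, false, false) with
  | (pipes, tab, aligned, _, _, _, ok) =>
    let aligned := if ok then aligned + 1 else aligned
    decide (4 < pipes) || tab || decide (3 < aligned)

-- ===== PRECONDITION & SPEC =====
def Spec_might_contain_table_py (text : String) (out : Bool) : Prop := out = might_contain_table_py_alt text
instance (text : String) (out : Bool) : Decidable (Spec_might_contain_table_py text out) := by unfold Spec_might_contain_table_py; infer_instance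

-- ===== CLAIM (what is proved, stated in full; the proofs are below) =====
def Claim_equal_might_contain_table_py : Prop := ∀ (text : String), Dom_might_contain_table_py text → Spec_might_contain_table_py text (might_contain_table_py text)

-- ===== LEMMAS AND PROOFS =====

-- proof-side vocabulary: non-whitespace test, the three-space pattern, trailing-space count,
-- the line machine (lstep/lfold) and the semantic characterisations Gp/Op/Pb
def nwsb (c : Char) : Bool := !PySem.Chars.isspace c
def sp3 : List Char := [' ', ' ', ' ']
def trailSp (u : List Char) : Nat := (u.reverse.takeWhile (fun c => c == ' ')).length
def Gp (u : List Char) : Prop :=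
  ∃ x z, u = x ++ sp3 ++ z ∧ x.any nwsb = true ∧ z.all PySem.Chars.isspace = true
def Op (u : List Char) : Prop :=
  ∃ x z, u = x ++ sp3 ++ z ∧ x.any nwsb = true ∧ z.any nwsb = true
def Pb (u : List Char) : Bool := PySem.Chars.isIn [' ', ' ', ' '] (PySem.Chars.strip u)
def lstart : Bool × Int × Bool × Bool := (false, 0, false, false)
def lstep : (Bool × Int × Bool × Bool) → Char → (Bool × Int × Bool × Bool)
  | (seen, run, good, ok), c =>
    if c = ' ' then
      let run := run + 1
      let good := if seen && decide (3 ≤ run) then true else good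
      (seen, run, good, ok)
    else if PySem.Chars.isspace c then (seen, 0, good, ok)
    else (true, 0, false, if good then true else ok)
def lfold : (Int × Bool × Int × Bool × Bool) → Char → (Int × Bool × Int × Bool × Bool)
  | (a, seen, run, good, ok), c =>
    if c = '\n' then (if ok then a + 1 else a, lstart.1, lstart.2.1, lstart.2.2.1, lstart.2.2.2)
    else (a, (lstep (seen, run, good, ok) c).1, (lstep (seen, run, good, ok) c).2.1,
          (lstep (seen, run, good, ok) c).2.2.1, (lstep (seen, run, good, ok) c).2.2.2)


-- s.count(sub) / 'c in s' for a single-character sub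
theorem chars_count_go_singleton (d : Char) :
    ∀ (l : List Char) (fuel : Nat) (acc : Nat), l.length ≤ fuel →
      PySem.Chars.count.go [d] fuel l acc = acc + l.count d := by
  intro l
  induction l with
  | nil => intro fuel acc _; cases fuel <;> simp [PySem.Chars.count.go]
  | cons h t ih =>
    intro fuel acc hf
    cases fuel with
    | zero => simp at hf
    | succ f =>
      rw [PySem.Chars.count.go]
      by_cases hdh : d = h
      · subst hdh
        simp [List.isPrefixOf, ih f (acc + 1) (by simpa using hf)]
        omega
      · simp [List.isPrefixOf, beq_iff_eq, hdh, ih f acc (by simpa using hf), Ne.symm hdh]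

theorem chars_count_singleton (d : Char) (s : List Char) :
    PySem.Chars.count s [d] = s.count d := by
  simpa [PySem.Chars.count] using chars_count_go_singleton d s s.length 0 le_rfl

theorem chars_isIn_singleton (d : Char) (s : List Char) :
    PySem.Chars.isIn [d] s = s.contains d := by
  cases h : PySem.Chars.isIn [d] s with
  | true =>
    obtain ⟨u, v, huv⟩ := (PySem.Chars.isIn_iff_infix [d] s).mp h
    subst huv; simp
  | false =>
    have h2 := (PySem.Chars.isIn_eq_false_iff [d] s).mp h
    symm; simp only [Bool.eq_false_iff, ne_eq, List.contains_eq_mem, decide_eq_true_eq]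
    intro hm
    obtain ⟨u, v, huv⟩ := List.append_of_mem hm
    exact h2 ⟨u, v, by simp [huv]⟩
theorem snoc_inj {α : Type} {a b : List α} {c d : α} (h : a ++ [c] = b ++ [d]) : a = b ∧ c = d := by
  have := List.append_inj' h (by simp)
  simpa using this

-- decomposition of a snoc against x ++ sp3 ++ z
theorem snoc_sp3 {u x z : List Char} {c : Char} (h : u ++ [c] = x ++ sp3 ++ z) :
    (∃ z', z = z' ++ [c] ∧ u = x ++ sp3 ++ z') ∨ (z = [] ∧ c = ' ' ∧ u = x ++ [' ', ' ']) := by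
  rcases List.eq_nil_or_concat z with hz | ⟨z', d, hz⟩
  · subst hz
    right
    have h2 : u ++ [c] = (x ++ [' ', ' ']) ++ [' '] := by simpa [sp3] using h
    obtain ⟨h3, h4⟩ := snoc_inj h2
    exact ⟨rfl, h4, h3⟩
  · subst hz
    left
    have h2 : u ++ [c] = (x ++ sp3 ++ z') ++ [d] := by simpa [List.concat_eq_append] using h
    obtain ⟨h3, h4⟩ := snoc_inj h2
    exact ⟨z', by simp [h4, List.concat_eq_append], h3⟩

theorem trailSp_snoc (u : List Char) (c : Char) :
    trailSp (u ++ [c]) = if c = ' ' then trailSp u + 1 else 0 := by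
  simp only [trailSp, List.reverse_append, List.reverse_cons, List.reverse_nil, List.nil_append,
    List.cons_append, List.takeWhile_cons]
  by_cases h : c = ' ' <;> simp [h]

theorem two_le_trailSp (u : List Char) (h : 2 ≤ trailSp u) :
    ∃ u', u = u' ++ [' ', ' '] := by
  unfold trailSp at h
  rcases hu : u.reverse with _ | ⟨a, t⟩
  · rw [hu] at h; simp at h
  · rw [hu, List.takeWhile_cons] at h
    by_cases ha : a == ' '
    · rw [if_pos ha] at h
      rcases ht : t with _ | ⟨b, t'⟩
      · rw [ht] at h; simp at h
      · rw [ht, List.takeWhile_cons] at h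
        by_cases hb : b == ' '
        · refine ⟨t'.reverse, ?_⟩
          have : u = (a :: b :: t').reverse := by
            rw [← ht, ← hu]; simp
          simp only [this, List.reverse_cons]
          simp [show a = ' ' from by simpa using ha, show b = ' ' from by simpa using hb]
        · rw [if_neg hb] at h; simp at h
    · rw [if_neg ha] at h; simp at h

-- last non-ws decomposition of a list with a non-ws element
theorem last_nws (z : List Char) (h : z.any nwsb = true) :
    ∃ z1 d z2, z = z1 ++ [d] ++ z2 ∧ nwsb d = true ∧ z2.all PySem.Chars.isspace = true := by
  induction z using List.reverseRecOn with
  | nil => simp at h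
  | append_singleton z' c ih =>
    by_cases hc : nwsb c = true
    · exact ⟨z', c, [], by simp, hc, by simp⟩
    · have hz' : z'.any nwsb = true := by
        rcases (by simpa using h) with h' | h'
        · exact List.any_eq_true.mpr h'
        · exact absurd h' hc
      obtain ⟨z1, d, z2, hzz, hd, hall⟩ := ih hz'
      refine ⟨z1, d, z2 ++ [c], by simp [hzz], hd, ?_⟩
      simp only [List.all_append, hall, Bool.true_and, List.all_cons, List.all_nil, Bool.and_true]
      simpa [nwsb] using hc

-- first non-ws decomposition
theorem first_nws (x : List Char) (h : x.any nwsb = true) :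
    ∃ x1 d x2, x = x1 ++ [d] ++ x2 ∧ nwsb d = true ∧ x1.all PySem.Chars.isspace = true := by
  induction x with
  | nil => simp at h
  | cons c x' ih =>
    by_cases hc : nwsb c = true
    · exact ⟨[], c, x', by simp, hc, by simp⟩
    · have hx' : x'.any nwsb = true := by
        rcases (by simpa using h) with h' | h'
        · exact absurd h' hc
        · exact List.any_eq_true.mpr h'
      obtain ⟨x1, d, x2, hxx, hd, hall⟩ := ih hx'
      refine ⟨c :: x1, d, x2, by simp [hxx], hd, ?_⟩
      simp only [List.all_cons, hall, Bool.and_true]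
      simpa [nwsb] using hc

theorem any_eq_false_iff_all (z : List Char) :
    z.any nwsb = false ↔ z.all PySem.Chars.isspace = true := by
  constructor
  · intro h
    rw [List.all_eq_true]
    intro c hc
    by_contra hcc
    have : z.any nwsb = true := List.any_eq_true.mpr ⟨c, hc, by simpa [nwsb] using hcc⟩
    simp [this] at h
  · intro h
    rw [Bool.eq_false_iff]
    intro hany
    obtain ⟨c, hc, hcn⟩ := List.any_eq_true.mp hany
    have := List.all_eq_true.mp h c hc
    simp [nwsb, this] at hcn

theorem nwsb_space : nwsb ' ' = false := by decide
theorem ws_space : PySem.Chars.isspace ' ' = true := by decide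

theorem Gp_nil : ¬ Gp [] := by rintro ⟨x, z, h, _, _⟩; simp [sp3] at h
theorem Op_nil : ¬ Op [] := by rintro ⟨x, z, h, _, _⟩; simp [sp3] at h

theorem Gp_snoc_space (u : List Char) :
    Gp (u ++ [' ']) ↔ Gp u ∨ (u.any nwsb = true ∧ 2 ≤ trailSp u) := by
  constructor
  · rintro ⟨x, z, he, hx, hz⟩
    rcases snoc_sp3 he with ⟨z', hzz, hu⟩ | ⟨hz0, _, hu⟩
    · subst hzz
      exact Or.inl ⟨x, z', hu, hx, by simp only [List.all_append, Bool.and_eq_true] at hz; exact hz.1⟩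
    · right
      constructor
      · subst hu; simp [List.any_append, hx]
      · subst hu
        have h1 : trailSp (x ++ [' ', ' ']) = trailSp x + 2 := by
          rw [show x ++ [' ', ' '] = (x ++ [' ']) ++ [' '] from by simp,
            trailSp_snoc, trailSp_snoc]
          simp
        omega
  · rintro (⟨x, z, he, hx, hz⟩ | ⟨hany, htr⟩)
    · exact ⟨x, z ++ [' '], by simp [he], hx, by simp [hz, ws_space]⟩
    · obtain ⟨u', hu⟩ := two_le_trailSp u htr
      refine ⟨u', [], by simp [hu, sp3], ?_, by simp⟩
      subst hu
      simpa [List.any_append, nwsb_space] using hany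

theorem Op_snoc_space (u : List Char) : Op (u ++ [' ']) ↔ Op u := by
  constructor
  · rintro ⟨x, z, he, hx, hz⟩
    rcases snoc_sp3 he with ⟨z', hzz, hu⟩ | ⟨hz0, _, _⟩
    · subst hzz
      refine ⟨x, z', hu, hx, ?_⟩
      simpa [List.any_append, nwsb_space] using hz
    · subst hz0; simp at hz
  · rintro ⟨x, z, he, hx, hz⟩
    exact ⟨x, z ++ [' '], by simp [he], hx, by simp [List.any_append, hz]⟩

theorem Gp_snoc_ws (u : List Char) (c : Char) (hws : PySem.Chars.isspace c = true)
    (hc : c ≠ ' ') : Gp (u ++ [c]) ↔ Gp u := by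
  constructor
  · rintro ⟨x, z, he, hx, hz⟩
    rcases snoc_sp3 he with ⟨z', hzz, hu⟩ | ⟨_, hsp, _⟩
    · subst hzz
      exact ⟨x, z', hu, hx, by simp only [List.all_append, Bool.and_eq_true] at hz; exact hz.1⟩
    · exact absurd hsp hc
  · rintro ⟨x, z, he, hx, hz⟩
    exact ⟨x, z ++ [c], by simp [he], hx, by simp [hz, hws]⟩

theorem Op_snoc_ws (u : List Char) (c : Char) (hws : PySem.Chars.isspace c = true)
    (hc : c ≠ ' ') : Op (u ++ [c]) ↔ Op u := by
  constructor
  · rintro ⟨x, z, he, hx, hz⟩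
    rcases snoc_sp3 he with ⟨z', hzz, hu⟩ | ⟨_, hsp, _⟩
    · subst hzz
      refine ⟨x, z', hu, hx, ?_⟩
      simpa [List.any_append, nwsb, hws] using hz
    · exact absurd hsp hc
  · rintro ⟨x, z, he, hx, hz⟩
    exact ⟨x, z ++ [c], by simp [he], hx, by simp [List.any_append, hz]⟩

theorem Gp_snoc_nws (u : List Char) (c : Char) (hn : PySem.Chars.isspace c = false) :
    ¬ Gp (u ++ [c]) := by
  rintro ⟨x, z, he, hx, hz⟩
  rcases snoc_sp3 he with ⟨z', hzz, _⟩ | ⟨_, hsp, _⟩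
  · subst hzz
    simp [List.all_append, hn] at hz
  · subst hsp; exact absurd hn (by decide)

theorem Op_snoc_nws (u : List Char) (c : Char) (hn : PySem.Chars.isspace c = false) :
    Op (u ++ [c]) ↔ Op u ∨ Gp u := by
  constructor
  · rintro ⟨x, z, he, hx, hz⟩
    rcases snoc_sp3 he with ⟨z', hzz, hu⟩ | ⟨_, hsp, _⟩
    · subst hzz
      cases hz' : z'.any nwsb with
      | true => exact Or.inl ⟨x, z', hu, hx, hz'⟩
      | false => exact Or.inr ⟨x, z', hu, hx, (any_eq_false_iff_all z').mp hz'⟩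
    · subst hsp; exact absurd hn (by decide)
  · rintro (⟨x, z, he, hx, hz⟩ | ⟨x, z, he, hx, hz⟩)
    · exact ⟨x, z ++ [c], by simp [he], hx, by simp [List.any_append, hz]⟩
    · exact ⟨x, z ++ [c], by simp [he], hx, by simp [List.any_append, nwsb, hn]⟩

theorem key (u : List Char) :
    (List.foldl lstep lstart u).1 = u.any nwsb ∧
    (List.foldl lstep lstart u).2.1 = (trailSp u : Int) ∧
    ((List.foldl lstep lstart u).2.2.1 = true ↔ Gp u) ∧
    ((List.foldl lstep lstart u).2.2.2 = true ↔ Op u) := by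
  induction u using List.reverseRecOn with
  | nil =>
    refine ⟨by simp [lstart], by simp [lstart, trailSp], ?_, ?_⟩
    · simp only [List.foldl_nil, lstart]
      exact ⟨fun h => by simp at h, fun h => absurd h Gp_nil⟩
    · simp only [List.foldl_nil, lstart]
      exact ⟨fun h => by simp at h, fun h => absurd h Op_nil⟩
  | append_singleton u c ih =>
    obtain ⟨ih1, ih2, ih3, ih4⟩ := ih
    rcases hS : List.foldl lstep lstart u with ⟨s1, s2, s3, s4⟩
    rw [hS] at ih1 ih2 ih3 ih4
    simp only at ih1 ih2 ih3 ih4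
    rw [List.foldl_append, hS, List.foldl_cons, List.foldl_nil]
    by_cases hsp : c = ' '
    · subst hsp
      have hstep : lstep (s1, s2, s3, s4) ' '
          = (s1, s2 + 1, if s1 && decide (3 ≤ s2 + 1) then true else s3, s4) := by
        simp [lstep]
      rw [hstep]
      refine ⟨by simp [ih1, List.any_append, nwsb_space], ?_, ?_, ?_⟩
      · simp only [trailSp_snoc, ih2]; push_cast; ring
      · simp only
        rw [Gp_snoc_space]
        by_cases h1 : s1 = true
        · by_cases h2 : (3 : Int) ≤ s2 + 1
          · have hh : (s1 && decide (3 ≤ s2 + 1)) = true := by simp [h1, h2]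
            rw [hh, if_pos rfl]
            constructor
            · intro _; right
              refine ⟨by rw [← ih1, h1], ?_⟩
              have hzz : (2 : Int) ≤ (trailSp u : Int) := by rw [← ih2]; omega
              exact_mod_cast hzz
            · intro _; rfl
          · have hh : (s1 && decide (3 ≤ s2 + 1)) = false := by simp [h2]
            rw [hh, if_neg (by simp)]
            rw [ih3]
            constructor
            · exact Or.inl
            · rintro (h | ⟨ha, htr⟩)
              · exact h
              · exfalso
                have hzz : (2 : Int) ≤ (trailSp u : Int) := by exact_mod_cast htr
                rw [← ih2] at hzz; omega
        · have hh : (s1 && decide (3 ≤ s2 + 1)) = false := by simp [h1]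
          rw [hh, if_neg (by simp)]
          rw [ih3]
          constructor
          · exact Or.inl
          · rintro (h | ⟨ha, _⟩)
            · exact h
            · exact absurd (ih1 ▸ ha) h1
      · simp only
        rw [Op_snoc_space]; exact ih4
    · by_cases hws : PySem.Chars.isspace c = true
      · have hstep : lstep (s1, s2, s3, s4) c = (s1, 0, s3, s4) := by
          simp [lstep, hsp, hws]
        rw [hstep]
        refine ⟨?_, ?_, ?_, ?_⟩
        · simp [ih1, List.any_append, nwsb, hws]
        · simp only [trailSp_snoc, if_neg hsp]; simp
        · simp only; rw [Gp_snoc_ws u c hws hsp]; exact ih3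
        · simp only; rw [Op_snoc_ws u c hws hsp]; exact ih4
      · have hn : PySem.Chars.isspace c = false := by simpa using hws
        have hstep : lstep (s1, s2, s3, s4) c
            = (true, 0, false, if s3 then true else s4) := by
          simp [lstep, hsp, hn]
        rw [hstep]
        refine ⟨?_, ?_, ?_, ?_⟩
        · simp [List.any_append, nwsb, hn]
        · simp only [trailSp_snoc, if_neg hsp]; simp
        · simp only
          constructor
          · intro h; simp at h
          · intro h; exact absurd h (Gp_snoc_nws u c hn)
        · simp only
          rw [Op_snoc_nws u c hn]
          by_cases h3 : s3 = true
          · rw [h3, if_pos rfl]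
            exact ⟨fun _ => Or.inr (ih3.mp h3), fun _ => rfl⟩
          · have h3' : s3 = false := by simpa using h3
            rw [h3', if_neg (by simp)]
            rw [ih4]
            constructor
            · exact Or.inl
            · rintro (h | h)
              · exact h
              · exact absurd (ih3.mpr h) h3
-- === new material ===
theorem rstrip_append_allws (v z : List Char) (hz : z.all PySem.Chars.isspace = true) :
    PySem.Chars.rstrip (v ++ z) = PySem.Chars.rstrip v := by
  unfold PySem.Chars.rstrip
  rw [List.reverse_append, List.dropWhile_append]
  have : List.dropWhile PySem.Chars.isspace z.reverse = [] := by
    rw [List.dropWhile_eq_nil_iff]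
    intro x hx
    exact List.all_eq_true.mp hz x (by simpa using hx)
  simp [this]

theorem rstrip_snoc_nws (v : List Char) (d : Char) (hd : PySem.Chars.isspace d = false) :
    PySem.Chars.rstrip (v ++ [d]) = v ++ [d] := by
  unfold PySem.Chars.rstrip
  rw [List.reverse_append]
  simp [hd]

theorem rstrip_decomp (w : List Char) :
    ∃ t, w = PySem.Chars.rstrip w ++ t ∧ t.all PySem.Chars.isspace = true := by
  refine ⟨(w.reverse.takeWhile PySem.Chars.isspace).reverse, ?_, ?_⟩
  · unfold PySem.Chars.rstrip
    conv_lhs => rw [← List.reverse_reverse w, ← List.takeWhile_append_dropWhile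
      (p := PySem.Chars.isspace) (l := w.reverse)]
    rw [List.reverse_append]
  · rw [List.all_eq_true]
    intro x hx
    exact List.mem_takeWhile_imp (by simpa using hx)

theorem S_rstrip (w : List Char) :
    sp3 <:+: PySem.Chars.rstrip w ↔ ∃ x z, w = x ++ sp3 ++ z ∧ z.any nwsb = true := by
  constructor
  · rintro ⟨x, z', hxz⟩
    obtain ⟨t, hw, ht⟩ := rstrip_decomp w
    rcases hdw : List.dropWhile PySem.Chars.isspace w.reverse with _ | ⟨d, rest⟩
    · exfalso
      have h0 : PySem.Chars.rstrip w = [] := by unfold PySem.Chars.rstrip; rw [hdw]; rfl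
      rw [h0] at hxz; simp [sp3] at hxz
    · have hr : PySem.Chars.rstrip w = rest.reverse ++ [d] := by
        unfold PySem.Chars.rstrip; rw [hdw]; simp
      have hd : PySem.Chars.isspace d = false := by
        have h1 : List.dropWhile PySem.Chars.isspace w.reverse ≠ [] := by rw [hdw]; simp
        have h2 := List.head_dropWhile_not PySem.Chars.isspace h1
        simp only [hdw, List.head_cons] at h2
        exact h2
      rcases List.eq_nil_or_concat z' with hz0 | ⟨z'', d', hz⟩
      · exfalso
        subst hz0
        have h2 : (x ++ [' ', ' ']) ++ [' '] = rest.reverse ++ [d] := by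
          rw [← hr, ← hxz]; simp [sp3]
        have := (snoc_inj h2).2
        rw [← this] at hd
        exact absurd hd (by decide)
      · rw [hz, List.concat_eq_append] at hxz
        have h2 : (x ++ sp3 ++ z'') ++ [d'] = rest.reverse ++ [d] := by
          rw [← hr, ← hxz]; simp
        have hdd := (snoc_inj h2).2
        refine ⟨x, z'' ++ [d'] ++ t, ?_, ?_⟩
        · rw [hw, hr, ← h2]; simp
        · have : nwsb d' = true := by simp [nwsb, hdd ▸ hd]
          simp [List.any_append, this]
  · rintro ⟨x, z, hw, hz⟩
    obtain ⟨z1, d, z2, hzz, hd, hall⟩ := last_nws z hz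
    have hw2 : w = ((x ++ sp3 ++ z1) ++ [d]) ++ z2 := by rw [hw, hzz]; simp
    rw [hw2, rstrip_append_allws _ _ hall,
      rstrip_snoc_nws _ _ (by simpa [nwsb] using hd)]
    exact ⟨x, z1 ++ [d], by simp⟩

theorem lstrip_decomp (u : List Char) :
    ∃ t, u = t ++ PySem.Chars.lstrip u ∧ t.all PySem.Chars.isspace = true := by
  refine ⟨u.takeWhile PySem.Chars.isspace, ?_, ?_⟩
  · unfold PySem.Chars.lstrip
    rw [List.takeWhile_append_dropWhile]
  · rw [List.all_eq_true]
    intro x hx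
    exact List.mem_takeWhile_imp hx

theorem lstrip_append_allws (t v : List Char) (ht : t.all PySem.Chars.isspace = true) :
    PySem.Chars.lstrip (t ++ v) = PySem.Chars.lstrip v := by
  unfold PySem.Chars.lstrip
  rw [List.dropWhile_append]
  have : List.dropWhile PySem.Chars.isspace t = [] := by
    rw [List.dropWhile_eq_nil_iff]
    intro x hx
    exact List.all_eq_true.mp ht x hx
  simp [this]

theorem lstrip_cons_nws (v : List Char) (d : Char) (hd : PySem.Chars.isspace d = false) :
    PySem.Chars.lstrip (d :: v) = d :: v := by
  unfold PySem.Chars.lstrip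
  simp [hd]

-- bridging: decompositions of lstrip u with a property of z lift to u with a nws in x
theorem SL4 (u : List Char) :
    (∃ x z, PySem.Chars.lstrip u = x ++ sp3 ++ z ∧ z.any nwsb = true) ↔ Op u := by
  constructor
  · rintro ⟨x, z, hl, hz⟩
    obtain ⟨t, hu, ht⟩ := lstrip_decomp u
    rcases hdw : List.dropWhile PySem.Chars.isspace u with _ | ⟨d, rest⟩
    · exfalso
      have h0 : PySem.Chars.lstrip u = [] := by unfold PySem.Chars.lstrip; rw [hdw]
      rw [h0] at hl; simp [sp3] at hl
    · have hr : PySem.Chars.lstrip u = d :: rest := by unfold PySem.Chars.lstrip; rw [hdw]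
      have hd : PySem.Chars.isspace d = false := by
        have h1 : List.dropWhile PySem.Chars.isspace u ≠ [] := by rw [hdw]; simp
        have h2 := List.head_dropWhile_not PySem.Chars.isspace h1
        simp only [hdw, List.head_cons] at h2
        exact h2
      rcases hx0 : x with _ | ⟨d0, x'⟩
      · exfalso
        rw [hx0, hr] at hl
        have : d = ' ' := by simpa [sp3] using congrArg (fun l => l.head?) hl
        rw [this] at hd
        exact absurd hd (by decide)
      · rw [hx0, hr] at hl
        have hdd : d0 = d := by simpa using (congrArg (fun l => l.head?) hl).symm
        refine ⟨t ++ (d0 :: x'), z, ?_, ?_, hz⟩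
        · rw [hu, hr, hl]; simp
        · have : nwsb d0 = true := by simp [nwsb, hdd ▸ hd]
          simp [List.any_append, this]
  · rintro ⟨x, z, hu, hx, hz⟩
    obtain ⟨x1, d, x2, hxx, hd, hall⟩ := first_nws x hx
    have hu2 : u = x1 ++ (d :: (x2 ++ sp3 ++ z)) := by rw [hu, hxx]; simp
    rw [hu2]
    rw [lstrip_append_allws _ _ hall, lstrip_cons_nws _ _ (by simpa [nwsb] using hd)]
    exact ⟨d :: x2, z, by simp, hz⟩

theorem strip_sp3 (u : List Char) : Pb u = true ↔ Op u := by
  unfold Pb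
  rw [PySem.Chars.isIn_iff_infix]
  unfold PySem.Chars.strip
  rw [show ([' ', ' ', ' '] : List Char) = sp3 from rfl]
  rw [S_rstrip]
  exact SL4 u
theorem key_ok (u : List Char) : (List.foldl lstep lstart u).2.2.2 = Pb u := by
  rw [Bool.eq_iff_iff, (key u).2.2.2, strip_sp3]

theorem lfold_newline (a : Int) (s : Bool × Int × Bool × Bool) :
    lfold (a, s) '\n' = (if s.2.2.2 then a + 1 else a, lstart) := by
  rcases s with ⟨s1, s2, s3, s4⟩
  simp [lfold, lstart]

theorem lfold_other (a : Int) (s : Bool × Int × Bool × Bool) (c : Char) (hc : c ≠ '\n') :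
    lfold (a, s) c = (a, lstep s c) := by
  rcases s with ⟨s1, s2, s3, s4⟩
  simp [lfold, hc]

theorem go_machine :
    ∀ (l : List Char) (fuel : Nat) (cur : List Char) (acc : List (List Char)) (a : Int),
      l.length ≤ fuel →
      (let r := List.foldl lfold (a, List.foldl lstep lstart cur.reverse) l
       (r.1 + (if r.2.2.2.2 then 1 else 0)) + ((acc.countP Pb : Nat) : Int))
        = a + (((PySem.Chars.splitOn.go ['\n'] fuel l cur acc).countP Pb : Nat) : Int) := by
  intro l
  induction l with
  | nil =>
    intro fuel cur acc a _
    have hok := key_ok cur.reverse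
    cases fuel <;>
      simp only [PySem.Chars.splitOn.go, List.foldl_nil, List.countP_reverse, List.append_nil,
        List.countP_cons, hok] <;>
      rcases h : Pb cur.reverse <;> simp [h] <;> ring
  | cons c t ih =>
    intro fuel cur acc a hf
    cases fuel with
    | zero => simp at hf
    | succ f =>
      rw [PySem.Chars.splitOn.go]
      by_cases hc : c = '\n'
      · subst hc
        rw [show (['\n'].isPrefixOf ('\n' :: t)) = true from by simp [List.isPrefixOf]]
        rw [if_pos rfl]
        rw [show List.drop ['\n'].length ('\n' :: t) = t from by simp]
        have hok := key_ok cur.reverse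
        simp only [List.foldl_cons, lfold_newline]
        have hih := ih f [] (cur.reverse :: acc)
          (if (List.foldl lstep lstart cur.reverse).2.2.2 then a + 1 else a) (by simpa using hf)
        simp only [List.reverse_nil, List.foldl_nil] at hih
        rw [List.countP_cons] at hih
        rw [hok] at hih ⊢
        rcases h : Pb cur.reverse with _ | _ <;> rw [h] at hih <;>
          simp only [Bool.false_eq_true, if_false] at hih ⊢ <;>
          push_cast at hih ⊢ <;> omega
      · rw [show (['\n'].isPrefixOf (c :: t)) = false from by
          simp [List.isPrefixOf]; exact fun h => absurd h.symm hc]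
        simp only [Bool.false_eq_true, if_false]
        have := ih f (c :: cur) acc a (by simpa using Nat.le_of_succ_le_succ hf)
        rw [List.foldl_cons, lfold_other a _ c hc]
        rw [show List.foldl lstep lstart ((c :: cur).reverse)
              = lstep (List.foldl lstep lstart cur.reverse) c from by
          simp [List.foldl_append]] at this
        exact this
theorem bstep_one (p : Int) (t : Bool) (q : Int × Bool × Int × Bool × Bool) (c : Char) :
    bstep (p, t, q.1, q.2.1, q.2.2.1, q.2.2.2.1, q.2.2.2.2) c
      = (p + (if c = '|' then 1 else 0), t || decide (c = '\t'),
         (lfold q c).1, (lfold q c).2.1, (lfold q c).2.2.1, (lfold q c).2.2.2.1, (lfold q c).2.2.2.2) := by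
  obtain ⟨a, seen, run, good, ok⟩ := q
  simp only [bstep, lfold, lstep, lstart]
  by_cases h1 : c = '\n'
  · subst h1; simp
  · by_cases h2 : c = ' ' <;> by_cases h3 : c = '|' <;> by_cases h4 : c = '\t' <;>
      simp_all <;> split_ifs <;> simp_all [PySem.Chars.isspace] <;> omega
theorem bstep_split :

    ∀ (cs : List Char) (p : Int) (t : Bool) (q : Int × Bool × Int × Bool × Bool),
      List.foldl bstep (p, t, q.1, q.2.1, q.2.2.1, q.2.2.2.1, q.2.2.2.2) cs
        = (p + (cs.count '|' : Int), t || cs.contains '\t',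
           (List.foldl lfold q cs).1, (List.foldl lfold q cs).2.1,
           (List.foldl lfold q cs).2.2.1, (List.foldl lfold q cs).2.2.2.1,
           (List.foldl lfold q cs).2.2.2.2) := by
  intro cs
  induction cs with
  | nil => intro p t q; simp
  | cons c cs ih =>
    intro p t q
    simp only [List.foldl_cons, bstep_one, ih]
    refine congrArg₂ _ ?_ (congrArg₂ _ ?_ rfl)
    · rw [List.count_cons]
      by_cases h : c = '|' <;> simp [h] <;> push_cast <;> ring
    · rw [show (c :: cs).contains '\t' = (decide (c = '\t') || cs.contains '\t') from by
        simp [eq_comm]]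
      rw [Bool.or_assoc]

theorem machine_countP (cs : List Char) :
    (List.foldl lfold ((0 : Int), lstart) cs).1
      + (if (List.foldl lfold ((0 : Int), lstart) cs).2.2.2.2 then 1 else 0)
      = (((PySem.Chars.splitOn cs ['\n']).countP Pb : Nat) : Int) := by
  have h := go_machine cs (cs.length + 1) [] [] 0 (Nat.le_succ _)
  simpa [PySem.Chars.splitOn, lstart] using h

theorem aligned_countP (cs : List Char) :
    (((PySem.Chars.splitOn cs ['\n']).filter Pb).map (fun _ => (1 : Int))).sum
      = (((PySem.Chars.splitOn cs ['\n']).countP Pb : Nat) : Int) := by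
  rw [List.countP_eq_length_filter]
  generalize (PySem.Chars.splitOn cs ['\n']).filter _ = l
  induction l with
  | nil => simp
  | cons x t ih => simp; omega

-- ===== VERDICT (by name: the statement is the Claim_ definition above) =====
theorem might_contain_table_py_spec : Claim_equal_might_contain_table_py := by
  intro text _
  unfold Spec_might_contain_table_py might_contain_table_py might_contain_table_py_alt
  rw [show ((0 : Int), false, (0 : Int), false, (0 : Int), false, false)
        = ((0 : Int), false, ((0 : Int), lstart).1, ((0 : Int), lstart).2.1,
           ((0 : Int), lstart).2.2.1, ((0 : Int), lstart).2.2.2.1, ((0 : Int), lstart).2.2.2.2)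
      from rfl]
  rw [bstep_split text.toList 0 false ((0 : Int), lstart)]
  simp only [zero_add, Bool.false_or]
  have hcp := machine_countP text.toList
  set lf := List.foldl lfold ((0 : Int), lstart) text.toList with hlf
  have halig : (if lf.2.2.2.2 then lf.1 + 1 else lf.1)
      = (((PySem.Chars.splitOn text.toList ['\n']).countP Pb : Nat) : Int) := by
    rcases h : lf.2.2.2.2 <;> simp only [h, Bool.false_eq_true, reduceIte, if_false] at hcp ⊢ <;> omega
  have haligned : (((PySem.Chars.splitOn text.toList ['\n']).filter
        (fun line => PySem.Chars.isIn [' ', ' ', ' '] (PySem.Chars.strip line))).map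
        (fun _ => (1 : Int))).sum
      = (((PySem.Chars.splitOn text.toList ['\n']).countP Pb : Nat) : Int) := by
    exact aligned_countP text.toList
  have hcount_str : PySem.Str.count text "|" = text.toList.count '|' := by
    rw [PySem.Str.count_eq]; exact chars_count_singleton '|' text.toList
  have hisin_str : PySem.Str.isIn "|" text = text.toList.contains '|' := by
    rw [PySem.Str.isIn_eq]; exact chars_isIn_singleton '|' text.toList
  have htab_str : PySem.Str.isIn "\t" text = text.toList.contains '\t' := by
    rw [PySem.Str.isIn_eq]; exact chars_isIn_singleton '\t' text.toList
  simp only [haligned, hcount_str, hisin_str, htab_str, halig]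
  by_cases h1 : 4 < text.toList.count '|'
  · have hmem : text.toList.contains '|' = true := by
      simp only [List.contains_eq_mem, decide_eq_true_eq]
      exact List.count_pos_iff.mp (by omega)
    have h1i : (4 : Int) < (text.toList.count '|' : Int) := by exact_mod_cast h1
    simp [h1, h1i]
    exact Or.inl (List.count_pos_iff.mp (by omega))
  · have h1i : ¬ (4 : Int) < (text.toList.count '|' : Int) := by exact_mod_cast h1
    by_cases h2 : text.toList.contains '\t' = true
    · simp [h1, h1i]
    · by_cases h3 : (3 : Int) < (((PySem.Chars.splitOn text.toList ['\n']).countP Pb : Nat) : Int) <;>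
        simp [h1, h1i, h3]
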